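-- pv_equiv track=rewrite | github.com/EddieLin1/Candy-Crush | candymod.py | check_if_adjacent
-- ===== SOURCE A (Python) =====
-- def check_if_adjacent(positions_1):
--     x = positions_1[0][0]
--     y = positions_1[0][1]
--     correct = []
--     counter1 = -1
--     for i in range(2):
--         correct.append([x, y + counter1])
--         counter1 = 1
--     counter2 = -1
--     for i in range(2):
--         correct.append([x + counter2, y])
--         counter2 = 1
--     if positions_1[1] in correct:
--         return True
--     else:
--         return False
-- ===== SOURCE B (Python) =====
-- def check_if_adjacent(positions_1):
--     x, y = positions_1[0][0], positions_1[0][1]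
--     cell = positions_1[1]
--     if len(cell) != 2:
--         return False
--     return abs(cell[0] - x) + abs(cell[1] - y) == 1
-- ===== Notes on version B (the rewrite author's own statement) =====
-- stated objective: simpler
-- what changed: Replaced the two neighbor-list-building loops plus list-membership test by a direct closed-form check: the second cell is a 2-element list whose Manhattan distance from the first cell's coordinates is exactly 1.
import Mathlib
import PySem

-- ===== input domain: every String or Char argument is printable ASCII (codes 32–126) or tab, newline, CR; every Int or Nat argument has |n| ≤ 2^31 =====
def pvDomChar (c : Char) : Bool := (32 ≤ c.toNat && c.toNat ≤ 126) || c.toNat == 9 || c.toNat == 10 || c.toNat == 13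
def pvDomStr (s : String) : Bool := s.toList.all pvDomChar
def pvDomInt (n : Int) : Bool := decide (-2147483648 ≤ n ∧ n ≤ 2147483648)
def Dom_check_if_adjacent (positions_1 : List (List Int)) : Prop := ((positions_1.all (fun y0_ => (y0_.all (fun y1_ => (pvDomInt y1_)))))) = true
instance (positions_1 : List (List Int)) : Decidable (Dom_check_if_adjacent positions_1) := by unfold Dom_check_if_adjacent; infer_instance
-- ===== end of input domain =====

-- B replaces A's build-4-neighbors-then-membership-test with a closed-form Manhattan-distance-1 check (objective: simpler).

-- ===== PORT A =====
def check_if_adjacent (positions_1 : List (List Int)) : Bool :=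
  let p0 := PySem.List.pyGetD positions_1 0 []
  let x := PySem.List.pyGetD p0 0 0
  let y := PySem.List.pyGetD p0 1 0
  -- correct = []; counter1 = -1; for i in range(2): correct.append([x, y+counter1]); counter1 = 1
  let s1 := (PySem.List.pyRange 0 2 1).foldl
    (fun (st : List (List Int) × Int) _ => (st.1 ++ [[x, y + st.2]], 1)) ([], -1)
  -- counter2 = -1; for i in range(2): correct.append([x+counter2, y]); counter2 = 1
  let s2 := (PySem.List.pyRange 0 2 1).foldl
    (fun (st : List (List Int) × Int) _ => (st.1 ++ [[x + st.2, y]], 1)) (s1.1, -1)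
  if PySem.List.pyGetD positions_1 1 [] ∈ s2.1 then true else false

-- ===== PORT B =====
def check_if_adjacent_alt (positions_1 : List (List Int)) : Bool :=
  let p0 := PySem.List.pyGetD positions_1 0 []
  let x := PySem.List.pyGetD p0 0 0
  let y := PySem.List.pyGetD p0 1 0
  let cell := PySem.List.pyGetD positions_1 1 []
  if cell.length ≠ 2 then false
  else decide ((PySem.List.pyGetD cell 0 0 - x).natAbs + (PySem.List.pyGetD cell 1 0 - y).natAbs = 1)

-- ===== PRECONDITION & SPEC =====
-- Pre_ excludes exactly the inputs where Python A raises IndexError: fewer than two positions,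
-- or a first position with fewer than two coordinates (both B and A raise there).
def Pre_check_if_adjacent (positions_1 : List (List Int)) : Prop :=
  2 ≤ positions_1.length ∧ 2 ≤ (positions_1.headD []).length
instance (positions_1 : List (List Int)) : Decidable (Pre_check_if_adjacent positions_1) := by
  unfold Pre_check_if_adjacent; infer_instance
def pvWitness_check_if_adjacent : List (List Int) := [[1, 2], [1, 3]]

def Spec_check_if_adjacent (positions_1 : List (List Int)) (out : Bool) : Prop := out = check_if_adjacent_alt positions_1
instance (positions_1 : List (List Int)) (out : Bool) : Decidable (Spec_check_if_adjacent positions_1 out) := by unfold Spec_check_if_adjacent; infer_instance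

-- ===== CLAIM (what is proved, stated in full; the proofs are below) =====
def Claim_equal_check_if_adjacent : Prop := ∀ (positions_1 : List (List Int)), Dom_check_if_adjacent positions_1 → Pre_check_if_adjacent positions_1 → Spec_check_if_adjacent positions_1 (check_if_adjacent positions_1)

-- ===== LEMMAS AND PROOFS =====

-- membership of an arbitrary list in the 4-neighbor candidate list ↔ Manhattan-distance-1 pair
lemma mem_neighbors_iff (x y : Int) (p : List Int) :
    (p ∈ [[x, y + -1], [x, y + 1], [x + -1, y], [x + 1, y]]) ↔
      ∃ a b, p = [a, b] ∧ (a - x).natAbs + (b - y).natAbs = 1 := by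
  constructor
  · intro h
    simp only [List.mem_cons, List.not_mem_nil, or_false] at h
    rcases h with h | h | h | h <;> subst h
    · exact ⟨x, y + -1, rfl, by omega⟩
    · exact ⟨x, y + 1, rfl, by omega⟩
    · exact ⟨x + -1, y, rfl, by omega⟩
    · exact ⟨x + 1, y, rfl, by omega⟩
  · rintro ⟨a, b, rfl, hd⟩
    simp only [List.mem_cons, List.not_mem_nil, or_false, List.cons.injEq, and_true]
    omega

-- ===== VERDICT (by name: the statement is the Claim_ definition above) =====
theorem check_if_adjacent_spec : Claim_equal_check_if_adjacent := by
  intro positions_1 _ hpre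
  obtain ⟨h1, h2⟩ := hpre
  match positions_1, h1 with
  | (p0 :: p1 :: rest), _ =>
    simp only [List.headD] at h2
    match p0, h2 with
    | (x :: y :: t), _ =>
      unfold Spec_check_if_adjacent
      have g0 : PySem.List.pyGetD ((x::y::t)::p1::rest) 0 [] = x::y::t := by simp [pysem]
      have g1 : PySem.List.pyGetD ((x::y::t)::p1::rest) 1 [] = p1 := by simp [pysem]
      have gx : PySem.List.pyGetD (x::y::t) 0 0 = x := by simp [pysem]
      have gy : PySem.List.pyGetD (x::y::t) 1 0 = y := by simp [pysem]
      have hA : check_if_adjacent ((x :: y :: t) :: p1 :: rest) =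
          (if p1 ∈ [[x, y + -1], [x, y + 1], [x + -1, y], [x + 1, y]] then true else false) := by
        unfold check_if_adjacent
        rw [show PySem.List.pyRange 0 2 1 = [0, 1] by decide]
        simp only [List.foldl, g0, g1, gx, gy, List.nil_append, List.cons_append]
      have hB : check_if_adjacent_alt ((x :: y :: t) :: p1 :: rest) =
          (if p1.length ≠ 2 then false
           else decide ((PySem.List.pyGetD p1 0 0 - x).natAbs +
                        (PySem.List.pyGetD p1 1 0 - y).natAbs = 1)) := by
        unfold check_if_adjacent_alt
        simp only [g0, g1, gx, gy]
      rw [hA, hB]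
      by_cases hm : p1 ∈ [[x, y + -1], [x, y + 1], [x + -1, y], [x + 1, y]]
      · rw [if_pos hm]
        obtain ⟨a, b, rfl, hd⟩ := (mem_neighbors_iff x y p1).mp hm
        simp only [List.length_cons, List.length_nil]
        rw [if_neg (by omega)]
        have h0 : PySem.List.pyGetD [a, b] 0 0 = a := rfl
        have h1 : PySem.List.pyGetD [a, b] 1 0 = b := rfl
        rw [h0, h1]
        exact (decide_eq_true hd).symm
      · rw [if_neg hm]
        match p1 with
        | [] => rfl
        | [a] => rfl
        | (a :: b :: c :: t') => rfl
        | [a, b] =>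
          simp only [List.length_cons, List.length_nil]
          rw [if_neg (by omega)]
          have h0 : PySem.List.pyGetD [a, b] 0 0 = a := rfl
          have h1 : PySem.List.pyGetD [a, b] 1 0 = b := rfl
          rw [h0, h1]
          have : ¬ ((a - x).natAbs + (b - y).natAbs = 1) := fun hd =>
            hm ((mem_neighbors_iff x y [a, b]).mpr ⟨a, b, rfl, hd⟩)
          exact (decide_eq_false this).symm
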